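-- pv_equiv track=rewrite | github.com/FangTianhuaJ/pyle | analysis/readout.py | centersListToMQStatesDict
-- ===== SOURCE A (Python) =====
-- import itertools
--
-- def centersListToMQStatesDict(centersList):
--     """
--     centersList is for multiple qubits
--     we need dict[(1,0,0)] = idx
--     and inverseDict[idx] = (1,0,0)
--     @return: dict and inverseDict
--     """
--     stateToIdx = {}
--     idxToState = {}
--
--     states = [c.keys() for c in centersList]
--     mqStates = itertools.product(*states)
--     for idx, state in enumerate(mqStates):
--         stateToIdx[state] = idx
--         idxToState[idx] = state
--
--     return stateToIdx, idxToState
-- ===== SOURCE B (Python) =====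
-- def centersListToMQStatesDict(centersList):
--     """
--     centersList is for multiple qubits
--     we need dict[(1,0,0)] = idx
--     and inverseDict[idx] = (1,0,0)
--     @return: dict and inverseDict
--     """
--     cols = [list(c.keys()) for c in centersList]
--     N = 1
--     for col in cols:
--         N *= len(col)
--     stateToIdx = {}
--     idxToState = {}
--     for idx in range(N):
--         rem = idx
--         state = []
--         for col in reversed(cols):
--             size = len(col)
--             state = [col[rem % size]] + state
--             rem //= size
--         state = tuple(state)
--         stateToIdx[state] = idx
--         idxToState[idx] = state
--     return stateToIdx, idxToState
-- ===== Notes on version B (the rewrite author's own statement) =====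
-- stated objective: alternative
-- what changed: Replaces itertools.product enumeration with explicit mixed-radix decoding: the total count N is computed as the product of the key-list sizes and each index in range(N) is decoded digit by digit (last axis fastest) into its state tuple.
import Mathlib
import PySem

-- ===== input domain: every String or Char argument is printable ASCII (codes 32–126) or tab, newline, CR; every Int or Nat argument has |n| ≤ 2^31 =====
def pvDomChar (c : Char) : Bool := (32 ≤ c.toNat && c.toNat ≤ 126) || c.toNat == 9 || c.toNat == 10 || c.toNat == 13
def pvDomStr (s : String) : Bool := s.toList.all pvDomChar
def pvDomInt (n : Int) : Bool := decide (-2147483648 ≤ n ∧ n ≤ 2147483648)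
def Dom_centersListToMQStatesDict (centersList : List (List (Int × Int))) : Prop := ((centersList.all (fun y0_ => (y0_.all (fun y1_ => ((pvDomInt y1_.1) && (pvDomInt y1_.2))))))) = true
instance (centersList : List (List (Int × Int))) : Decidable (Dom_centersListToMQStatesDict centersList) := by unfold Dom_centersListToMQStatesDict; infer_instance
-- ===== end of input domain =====

-- B replaces itertools.product enumeration by mixed-radix index decoding over range(N); alternative decomposition, same cost.

-- ===== PORT A =====
-- itertools.product(*states): Cartesian product, rightmost axis varies fastest
def pvProdA : List (List Int) → List (List Int)
  | [] => [[]]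
  | c :: cs => c.flatMap (fun k => (pvProdA cs).map (fun t => k :: t))

def centersListToMQStatesDict (centersList : List (List (Int × Int))) : (List (List Int × Int)) × (List (Int × List Int)) :=
  let states := centersList.map (fun c => PySem.List.dedup (c.map Prod.fst))  -- c.keys()
  let mqStates := pvProdA states
  let p := (PySem.List.enumerate mqStates 0).foldl
      (fun (p : PySem.Dict (List Int) Int × PySem.Dict Int (List Int)) iv =>
        (p.1.insert iv.2 iv.1, p.2.insert iv.1 iv.2))
      (PySem.Dict.empty, PySem.Dict.empty)
  (p.1.items, p.2.items)

-- ===== PORT B =====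
-- the inner decode loop of Source B: (rem, state) over reversed(cols); idx ≥ 0 in Python, so Nat / and % are exact
def pvDecodeB (cols : List (List Int)) (idx : Nat) : List Int :=
  ((cols.reverse).foldl
    (fun (p : Nat × List Int) col =>
      (p.1 / col.length, col.getD (p.1 % col.length) 0 :: p.2))
    (idx, [])).2

def centersListToMQStatesDict_alt (centersList : List (List (Int × Int))) : (List (List Int × Int)) × (List (Int × List Int)) :=
  let cols := centersList.map (fun c => PySem.List.dedup (c.map Prod.fst))  -- list(c.keys())
  let N := cols.foldl (fun n col => n * col.length) 1
  let p := (List.range N).foldl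
      (fun (p : PySem.Dict (List Int) Int × PySem.Dict Int (List Int)) idx =>
        let st := pvDecodeB cols idx
        (p.1.insert st (idx : Int), p.2.insert (idx : Int) st))
      (PySem.Dict.empty, PySem.Dict.empty)
  (p.1.items, p.2.items)

-- ===== PRECONDITION & SPEC =====
def Spec_centersListToMQStatesDict (centersList : List (List (Int × Int))) (out : (List (List Int × Int)) × (List (Int × List Int))) : Prop := out = centersListToMQStatesDict_alt centersList
instance (centersList : List (List (Int × Int))) (out : (List (List Int × Int)) × (List (Int × List Int))) : Decidable (Spec_centersListToMQStatesDict centersList out) := by unfold Spec_centersListToMQStatesDict; infer_instance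

-- ===== CLAIM (what is proved, stated in full; the proofs are below) =====
def Claim_equal_centersListToMQStatesDict : Prop := ∀ (centersList : List (List (Int × Int))), Dom_centersListToMQStatesDict centersList → Spec_centersListToMQStatesDict centersList (centersListToMQStatesDict centersList)

-- ===== LEMMAS AND PROOFS =====

-- total number of states: the product of the axis sizes
def pvP : List (List Int) → Nat
  | [] => 1
  | c :: cs => c.length * pvP cs

-- recursive characterisation of mixed-radix decoding
def pvDecR : List (List Int) → Nat → List Int
  | [], _ => []
  | c :: cs, r => c.getD (r / pvP cs) 0 :: pvDecR cs (r % pvP cs)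

theorem pvP_foldl (cols : List (List Int)) (a : Nat) :
    cols.foldl (fun n col => n * col.length) a = a * pvP cols := by
  induction cols generalizing a with
  | nil => simp [pvP]
  | cons c cs ih => simp [List.foldl, pvP, ih, Nat.mul_assoc, Nat.mul_comm c.length]

theorem pvDecodeB_fold (cols : List (List Int)) :
    ∀ (q r : Nat) (st : List Int), r < pvP cols →
    (cols.reverse).foldl
      (fun (p : Nat × List Int) col =>
        (p.1 / col.length, col.getD (p.1 % col.length) 0 :: p.2))
      (q * pvP cols + r, st) = (q, pvDecR cols r ++ st) := by
  induction cols with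
  | nil =>
      intro q r st hr
      simp [pvP] at hr
      simp [pvDecR, hr, pvP]
  | cons c cs ih =>
      intro q r st hr
      have hP : 0 < pvP cs := by
        rcases Nat.eq_zero_or_pos (pvP cs) with h | h
        · simp [pvP, h] at hr
        · exact h
      have hd : r / pvP cs < c.length := by
        rw [Nat.div_lt_iff_lt_mul hP]
        simpa [pvP, Nat.mul_comm] using hr
      have hc : 0 < c.length := Nat.lt_of_le_of_lt (Nat.zero_le _) hd
      have hsplit : q * pvP (c :: cs) + r
          = (q * c.length + r / pvP cs) * pvP cs + r % pvP cs := by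
        have hdm := Nat.div_add_mod r (pvP cs)
        simp only [pvP]
        calc q * (c.length * pvP cs) + r
            = (q * c.length) * pvP cs + (pvP cs * (r / pvP cs) + r % pvP cs) := by
              rw [hdm]; ring
          _ = (q * c.length + r / pvP cs) * pvP cs + r % pvP cs := by ring
      rw [List.reverse_cons, List.foldl_append, hsplit,
        ih (q * c.length + r / pvP cs) (r % pvP cs) st (Nat.mod_lt _ hP)]
      have h1 : (q * c.length + r / pvP cs) / c.length = q := by
        rw [Nat.mul_comm q c.length, Nat.mul_add_div hc, Nat.div_eq_of_lt hd, Nat.add_zero]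
      have h2 : (q * c.length + r / pvP cs) % c.length = r / pvP cs := by
        rw [Nat.mul_comm q c.length, Nat.mul_add_mod, Nat.mod_eq_of_lt hd]
      simp [List.foldl, h1, h2, pvDecR]

theorem pvDecodeB_eq (cols : List (List Int)) (i : Nat) (hi : i < pvP cols) :
    pvDecodeB cols i = pvDecR cols i := by
  unfold pvDecodeB
  have := pvDecodeB_fold cols 0 i [] hi
  rw [Nat.zero_mul, Nat.zero_add] at this
  rw [this, List.append_nil]

theorem pvRangeBlock {α : Type} (m n : Nat) (f : Nat → α) :
    (List.range (m * n)).map f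
      = (List.range m).flatMap (fun d => (List.range n).map (fun r => f (d * n + r))) := by
  induction m with
  | zero => simp
  | succ m ih =>
      rw [Nat.succ_mul, List.range_add, List.map_append, List.map_map,
        List.range_succ, List.flatMap_append, ih]
      simp [Function.comp]

theorem pvFlatMapIndex {α : Type} (c : List Int) (f : Int → List α) :
    c.flatMap f = (List.range c.length).flatMap (fun d => f (c.getD d 0)) := by
  induction c generalizing f with
  | nil => simp
  | cons x xs ih =>
      rw [List.flatMap_cons, List.length_cons, List.range_succ_eq_map,
        List.flatMap_cons, List.flatMap_map]
      simp only [List.getD_cons_zero, List.getD_cons_succ]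
      rw [ih (fun k => f k)]

theorem pvProdA_eq (cols : List (List Int)) :
    pvProdA cols = (List.range (pvP cols)).map (pvDecR cols) := by
  induction cols with
  | nil => simp [pvProdA, pvP, List.range_succ, pvDecR]
  | cons c cs ih =>
      show c.flatMap (fun k => (pvProdA cs).map (fun t => k :: t)) = _
      rw [ih]
      simp only [List.map_map, Function.comp_def]
      rw [pvFlatMapIndex c (fun k => (List.range (pvP cs)).map (fun r => k :: pvDecR cs r))]
      show _ = (List.range (pvP (c :: cs))).map (pvDecR (c :: cs))
      have : pvP (c :: cs) = c.length * pvP cs := rfl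
      rw [this, pvRangeBlock]
      apply List.flatMap_congr
      intro d hd
      apply List.map_congr_left
      intro r hr
      rw [List.mem_range] at hd hr
      have hP : 0 < pvP cs := Nat.lt_of_le_of_lt (Nat.zero_le _) hr
      show c.getD d 0 :: pvDecR cs r = pvDecR (c :: cs) (d * pvP cs + r)
      have h1 : (d * pvP cs + r) / pvP cs = d := by
        rw [Nat.mul_comm d (pvP cs), Nat.mul_add_div hP, Nat.div_eq_of_lt hr, Nat.add_zero]
      have h2 : (d * pvP cs + r) % pvP cs = r := by
        rw [Nat.mul_comm d (pvP cs), Nat.mul_add_mod, Nat.mod_eq_of_lt hr]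
      simp [pvDecR, h1, h2]

theorem pvEnumMap {α β : Type} (l : List α) (f : α → β) (s : Int) :
    PySem.List.enumerate (l.map f) s
      = (PySem.List.enumerate l s).map (fun p => (p.1, f p.2)) := by
  induction l generalizing s with
  | nil => simp [PySem.List.enumerate_nil]
  | cons x xs ih => simp [PySem.List.enumerate_cons, ih]

theorem pvEnumRange (n : Nat) :
    PySem.List.enumerate (List.range n) 0
      = (List.range n).map (fun (i : Nat) => ((i : Int), i)) := by
  induction n with
  | zero => simp [PySem.List.enumerate_nil]
  | succ n ih =>
      rw [List.range_succ, PySem.List.enumerate_append, ih, List.map_append]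
      simp [PySem.List.enumerate_cons, PySem.List.enumerate_nil]

-- ===== VERDICT (by name: the statement is the Claim_ definition above) =====
theorem centersListToMQStatesDict_spec : Claim_equal_centersListToMQStatesDict := by
  intro centersList _
  unfold Spec_centersListToMQStatesDict centersListToMQStatesDict centersListToMQStatesDict_alt
  simp only []
  set cols := centersList.map (fun c => PySem.List.dedup (c.map Prod.fst)) with hcols
  rw [pvP_foldl cols 1, Nat.one_mul]
  rw [pvProdA_eq cols, pvEnumMap, pvEnumRange, List.map_map, List.foldl_map]
  refine congrArg (fun (q : PySem.Dict (List Int) Int × PySem.Dict Int (List Int)) => (q.1.items, q.2.items)) ?_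
  apply PySem.List.foldl_congr_mem
  intro acc i hi
  rw [List.mem_range] at hi
  simp [Function.comp, pvDecodeB_eq cols i hi]
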